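-- pv_equiv track=rewrite | github.com/7Xws5239/HuaWei_Interview | nowcoder/HJ16 购物单.py | maximize_satisfaction
-- ===== SOURCE A (Python) =====
-- def maximize_satisfaction(N, m, items):
--     """
--     计算在预算N元内可以获得的最大满意度。
--
--     :param N: 总预算
--     :param m: 物品的数量
--     :param items: 物品列表，每个元素是一个包含(v, p, q)的元组
--     :return: 最大满意度
--     """
--     from collections import defaultdict
--
--     # 将物品分为主件和附件
--     main_items = []
--     attach_items = defaultdict(list)
--
--     for i in range(m):
--         v, p, q = items[i]
--         if q == 0:
--             main_items.append((i + 1, v, p))  # (编号, 价格, 重要度)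
--         else:
--             attach_items[q].append((i + 1, v, p))  # (编号, 价格, 重要度)
--
--     # 初始化dp数组，dp[i]表示预算为i时的最大满意度
--     dp = [0] * (N + 1)
--
--     # 遍历每个主件及其附件组合
--     for main_id, v_main, p_main in main_items:
--         for budget in range(N, v_main - 1, -1):
--             # 只购买主件
--             if budget >= v_main:
--                 dp[budget] = max(dp[budget], dp[budget - v_main] + v_main * p_main)
--
--             # 购买主件和第一个附件
--             if main_id in attach_items:
--                 if budget >= v_main + attach_items[main_id][0][1]:
--                     dp[budget] = max(dp[budget], dp[budget - v_main - attach_items[main_id][0][1]] + v_main * p_main + attach_items[main_id][0][1] * attach_items[main_id][0][2])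
--
--                 # 购买主件和第二个附件
--                 if len(attach_items[main_id]) > 1:
--                     if budget >= v_main + attach_items[main_id][1][1]:
--                         dp[budget] = max(dp[budget], dp[budget - v_main - attach_items[main_id][1][1]] + v_main * p_main + attach_items[main_id][1][1] * attach_items[main_id][1][2])
--
--                     # 购买主件和两个附件
--                     if budget >= v_main + attach_items[main_id][0][1] + attach_items[main_id][1][1]:
--                         dp[budget] = max(dp[budget], dp[budget - v_main - attach_items[main_id][0][1] - attach_items[main_id][1][1]] + v_main * p_main + attach_items[main_id][0][1] * attach_items[main_id][0][2] + attach_items[main_id][1][1] * attach_items[main_id][1][2])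
--
--     return dp[N]
-- ===== SOURCE B (Python) =====
-- def maximize_satisfaction(N, m, items):
--     """
--     计算在预算N元内可以获得的最大满意度。
--     (memoized top-down recursion over main-item groups instead of a 1D dp budget sweep)
--     """
--     mains = []
--     attach = {}
--     for i in range(m):
--         v, p, q = items[i]
--         if q == 0:
--             mains.append((i + 1, v, p))
--         else:
--             attach.setdefault(q, []).append((i + 1, v, p))
--
--     # option list per main group: (cost, gain) for skip / main / main+att1 / main+att2 / main+both
--     groups = []
--     for mid, v, p in mains:
--         opts = [(0, 0), (v, v * p)]
--         atts = attach.get(mid, [])[:2]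
--         for _, av, ap in atts:
--             opts.append((v + av, v * p + av * ap))
--         if len(atts) == 2:
--             (_, a1v, a1p), (_, a2v, a2p) = atts
--             opts.append((v + a1v + a2v, v * p + a1v * a1p + a2v * a2p))
--         groups.append(opts)
--
--     memo = {}
--
--     def solve(i, budget):
--         if i == len(groups):
--             return 0
--         key = (i, budget)
--         if key in memo:
--             return memo[key]
--         best = max(gain + solve(i + 1, budget - cost)
--                    for cost, gain in groups[i] if cost <= budget)
--         memo[key] = best
--         return best
--
--     return solve(0, N)
-- ===== Notes on version B (the rewrite author's own statement) =====
-- stated objective: alternative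
-- what changed: Replaces A's in-place 1D dp array with a descending budget sweep per main item by precomputing each main group's (cost, gain) option list and solving with a memoized top-down recursion solve(i, budget) over the groups.
-- outside the precondition, e.g. on maximize_satisfaction(2, 2, [(3, 0, 0), (-2, -2, 1)]): A returns 0, B returns 4; on maximize_satisfaction(3, 1, [(-1, 5, 0)]): A raises IndexError, B returns 0; on maximize_satisfaction(-1, 0, []): A raises IndexError, B returns 0
import Mathlib
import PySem

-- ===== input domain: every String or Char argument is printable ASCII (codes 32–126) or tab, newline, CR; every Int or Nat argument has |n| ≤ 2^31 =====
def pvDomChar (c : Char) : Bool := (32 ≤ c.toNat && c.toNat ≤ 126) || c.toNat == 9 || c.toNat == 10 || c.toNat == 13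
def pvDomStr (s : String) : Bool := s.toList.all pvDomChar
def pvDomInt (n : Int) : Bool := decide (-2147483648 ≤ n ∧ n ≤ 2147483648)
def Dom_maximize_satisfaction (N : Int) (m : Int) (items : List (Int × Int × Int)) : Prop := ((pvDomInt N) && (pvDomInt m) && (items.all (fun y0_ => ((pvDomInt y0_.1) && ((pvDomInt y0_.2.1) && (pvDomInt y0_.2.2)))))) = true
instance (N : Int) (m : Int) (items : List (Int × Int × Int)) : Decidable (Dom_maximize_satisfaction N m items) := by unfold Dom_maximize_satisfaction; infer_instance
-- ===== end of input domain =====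

-- B replaces A's in-place 1D dp budget sweep by a memoized top-down recursion over per-main-item (cost, gain) option groups: an alternative decomposition of the same knapsack, similar cost.

-- ===== PORT A =====
-- body of A's inner 'for budget in range(N, v_main-1, -1)' loop: the up-to-four guarded max-updates of dp[budget]
-- one Python statement 'if budget >= c: dp[budget] = max(dp[budget], dp[budget - c] + g)' (cost/gain grouped)
def aStmt (dp : List Int) (b c γ : Int) : List Int :=
  if b ≥ c then PySem.List.pySetD dp b (max (PySem.List.pyGetD dp b 0) (PySem.List.pyGetD dp (b - c) 0 + γ)) else dp

-- body of A's inner 'for budget in range(N, v_main-1, -1)' loop: the up-to-four guarded max-updates of dp[budget]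
def aBody (attachL : Option (List (Int × Int × Int))) (v p : Int) (dp : List Int) (budget : Int) : List Int :=
  let dp := aStmt dp budget v (v * p)
  match attachL with
  | none => dp
  | some al =>
    let a0 := (PySem.List.pyGet? al 0).getD (0, 0, 0)   -- attach_items[main_id][0] (IndexError impossible: stored lists are nonempty)
    let dp := aStmt dp budget (v + a0.2.1) (v * p + a0.2.1 * a0.2.2)
    if PySem.List.len al > 1 then
      let a1 := (PySem.List.pyGet? al 1).getD (0, 0, 0)
      let dp := aStmt dp budget (v + a1.2.1) (v * p + a1.2.1 * a1.2.2)
      aStmt dp budget (v + a0.2.1 + a1.2.1) (v * p + a0.2.1 * a0.2.2 + a1.2.1 * a1.2.2)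
    else dp

def maximize_satisfaction (N : Int) (m : Int) (items : List (Int × Int × Int)) : Int :=
  -- for i in range(m): split items into main_items and attach_items (defaultdict(list))
  let st := (PySem.List.pyRange 0 m 1).foldl
    (fun (st : List (Int × Int × Int) × PySem.Dict Int (List (Int × Int × Int))) i =>
      let t := (PySem.List.pyGet? items i).getD (0, 0, 0)   -- items[i]; IndexError excluded by Pre_
      if t.2.2 = 0 then (st.1 ++ [(i + 1, t.1, t.2.1)], st.2)
      else (st.1, st.2.modify t.2.2 [] (fun l => l ++ [(i + 1, t.1, t.2.1)])))
    ([], PySem.Dict.empty)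
  let mains := st.1
  let attach := st.2
  let dp : List Int := List.replicate (N + 1).toNat 0
  let dp := mains.foldl
    (fun dp mi => (PySem.List.pyRange N (mi.2.1 - 1) (-1)).foldl (aBody (attach.get? mi.1) mi.2.1 mi.2.2) dp)
    dp
  PySem.List.pyGetD dp N 0   -- dp[N]; IndexError (N < 0) excluded by Pre_

-- ===== PORT B =====
-- option list of one main group: (cost, gain) for skip / main alone / main+att1 / main+att2 / main+both
def bOptions (v p : Int) (atts : List (Int × Int × Int)) : List (Int × Int) :=
  let opts := [(0, 0), (v, v * p)]
  let atts2 := PySem.List.slice atts none (some 2)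
  let opts := atts2.foldl (fun o a => o ++ [(v + a.2.1, v * p + a.2.1 * a.2.2)]) opts
  if PySem.List.len atts2 = 2 then
    match atts2 with
    | [a1, a2] => opts ++ [(v + a1.2.1 + a2.2.1, v * p + a1.2.1 * a1.2.2 + a2.2.1 * a2.2.2)]
    | _ => opts
  else opts

mutual
-- solve(i, budget): memoized recursion over the remaining groups (rest = groups[i:])
def bSolve : List (List (Int × Int)) → Int → Int → PySem.Dict (Int × Int) Int → Int × PySem.Dict (Int × Int) Int
  | [], _, _, memo => (0, memo)
  | g :: rest', i, budget, memo =>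
    match memo.get? (i, budget) with
    | some v => (v, memo)
    | none =>
      let r := bFold g rest' i budget (none, memo)
      match r.1 with
      | some best => (best, r.2.insert (i, budget) best)
      | none => (0, r.2)   -- Python: max() over an empty generator raises ValueError; unreachable under Pre_
termination_by rest _ _ _ => (rest.length, 1, 0)
-- the generator inside max(...): try each (cost, gain) of the group in order
def bFold : List (Int × Int) → List (List (Int × Int)) → Int → Int → Option Int × PySem.Dict (Int × Int) Int → Option Int × PySem.Dict (Int × Int) Int
  | [], _, _, _, acc => acc
  | cg :: rest, rest', i, budget, acc =>
    if cg.1 ≤ budget then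
      let s := bSolve rest' (i + 1) (budget - cg.1) acc.2
      bFold rest rest' i budget
        ((match acc.1 with | none => some (cg.2 + s.1) | some b => some (max b (cg.2 + s.1))), s.2)
    else bFold rest rest' i budget acc
termination_by g rest' _ _ _ => (rest'.length + 1, 0, g.length)
end

def maximize_satisfaction_alt (N : Int) (m : Int) (items : List (Int × Int × Int)) : Int :=
  let st := (PySem.List.pyRange 0 m 1).foldl
    (fun (st : List (Int × Int × Int) × PySem.Dict Int (List (Int × Int × Int))) i =>
      let t := (PySem.List.pyGet? items i).getD (0, 0, 0)   -- items[i]; IndexError excluded by Pre_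
      if t.2.2 = 0 then (st.1 ++ [(i + 1, t.1, t.2.1)], st.2)
      else (st.1, st.2.modify t.2.2 [] (fun l => l ++ [(i + 1, t.1, t.2.1)])))   -- attach.setdefault(q, []).append(...)
    ([], PySem.Dict.empty)
  let mains := st.1
  let attach := st.2
  let groups := mains.foldl (fun gs mi => gs ++ [bOptions mi.2.1 mi.2.2 (attach.getD mi.1 [])]) []
  (bSolve groups 0 N PySem.Dict.empty).1

-- ===== PRECONDITION & SPEC =====
-- Pre_ restricts to the task's natural domain (shopping-list knapsack): nonnegative budget, m within the list,
-- and nonnegative prices among the first m items.  Outside it A raises IndexError (N < 0, m > len(items), or a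
-- sufficiently negative price) or, for small negative prices, returns an accidental value via Python's
-- negative-index wraparound of the dp array.
def Pre_maximize_satisfaction (N : Int) (m : Int) (items : List (Int × Int × Int)) : Prop :=
  0 ≤ N ∧ m ≤ (items.length : Int) ∧ ∀ x ∈ items.take m.toNat, 0 ≤ x.1
instance (N : Int) (m : Int) (items : List (Int × Int × Int)) : Decidable (Pre_maximize_satisfaction N m items) := by
  unfold Pre_maximize_satisfaction; infer_instance

def pvWitness_maximize_satisfaction : Int × Int × (List (Int × Int × Int)) := (5, 3, [(2, 3, 0), (1, 2, 1), (3, 1, 0)])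

def Spec_maximize_satisfaction (N : Int) (m : Int) (items : List (Int × Int × Int)) (out : Int) : Prop := out = maximize_satisfaction_alt N m items
instance (N : Int) (m : Int) (items : List (Int × Int × Int)) (out : Int) : Decidable (Spec_maximize_satisfaction N m items out) := by unfold Spec_maximize_satisfaction; infer_instance

-- ===== CLAIM (what is proved, stated in full; the proofs are below) =====
def Claim_equal_maximize_satisfaction : Prop := ∀ (N : Int) (m : Int) (items : List (Int × Int × Int)), Dom_maximize_satisfaction N m items → Pre_maximize_satisfaction N m items → Spec_maximize_satisfaction N m items (maximize_satisfaction N m items)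

-- ===== LEMMAS AND PROOFS =====

-- well-formed (cost, gain) options: cost ≥ 0, and a free option has zero gain (gain = Σ price·priority over the same prices)
def optOk (cg : Int × Int) : Prop := 0 ≤ cg.1 ∧ (cg.1 = 0 → cg.2 = 0)
def grpOk (g : List (Int × Int)) : Prop := (∃ t, g = (0, 0) :: t) ∧ ∀ cg ∈ g, optOk cg
def gsOk (gs : List (List (Int × Int))) : Prop := ∀ g ∈ gs, grpOk g

-- reference value: best total gain from the groups gs within budget b (the common spec of both programs)
def bestF : List (List (Int × Int)) → Int → Int
  | [], _ => 0
  | g :: gs, b => g.foldl (fun acc cg => if cg.1 ≤ b then max acc (cg.2 + bestF gs (b - cg.1)) else acc) 0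

lemma cmax_ge_init (g : List (Int × Int)) (b : Int) (f : Int × Int → Int) (a : Int) :
    a ≤ g.foldl (fun acc cg => if cg.1 ≤ b then max acc (f cg) else acc) a := by
  induction g generalizing a with
  | nil => simp
  | cons cg t ih =>
    simp only [List.foldl_cons]
    split
    · exact le_trans (le_max_left _ _) (ih _)
    · exact ih _

lemma cmax_ge_mem (g : List (Int × Int)) (b : Int) (f : Int × Int → Int) (a : Int)
    (cg : Int × Int) (hm : cg ∈ g) (hc : cg.1 ≤ b) :
    f cg ≤ g.foldl (fun acc cg => if cg.1 ≤ b then max acc (f cg) else acc) a := by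
  induction g generalizing a with
  | nil => simp at hm
  | cons hd t ih =>
    simp only [List.foldl_cons]
    rcases List.mem_cons.mp hm with h | h
    · subst h
      simp only [hc, if_pos]
      exact le_trans (le_max_right _ _) (cmax_ge_init t b f _)
    · split
      · exact ih _ h
      · exact ih _ h

lemma cmax_le (g : List (Int × Int)) (b : Int) (f : Int × Int → Int) (a M : Int)
    (ha : a ≤ M) (h : ∀ cg ∈ g, cg.1 ≤ b → f cg ≤ M) :
    g.foldl (fun acc cg => if cg.1 ≤ b then max acc (f cg) else acc) a ≤ M := by
  induction g generalizing a with
  | nil => simpa using ha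
  | cons hd t ih =>
    simp only [List.foldl_cons]
    split
    · rename_i hle
      exact ih _ (max_le ha (h hd (List.mem_cons_self) hle)) (fun cg hm hc => h cg (List.mem_cons_of_mem _ hm) hc)
    · exact ih _ ha (fun cg hm hc => h cg (List.mem_cons_of_mem _ hm) hc)

lemma cmax_congr (g : List (Int × Int)) (b : Int) (f f' : Int × Int → Int) (a : Int)
    (h : ∀ cg ∈ g, cg.1 ≤ b → f cg = f' cg) :
    g.foldl (fun acc cg => if cg.1 ≤ b then max acc (f cg) else acc) a
      = g.foldl (fun acc cg => if cg.1 ≤ b then max acc (f' cg) else acc) a := by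
  induction g generalizing a with
  | nil => rfl
  | cons hd t ih =>
    simp only [List.foldl_cons]
    by_cases hc : hd.1 ≤ b
    · rw [if_pos hc, if_pos hc, h hd (List.mem_cons_self) hc]
      exact ih _ (fun cg hm hcc => h cg (List.mem_cons_of_mem _ hm) hcc)
    · rw [if_neg hc, if_neg hc]
      exact ih _ (fun cg hm hcc => h cg (List.mem_cons_of_mem _ hm) hcc)

lemma bestF_cons (g : List (Int × Int)) (gs : List (List (Int × Int))) (b : Int) :
    bestF (g :: gs) b
      = g.foldl (fun acc cg => if cg.1 ≤ b then max acc (cg.2 + bestF gs (b - cg.1)) else acc) 0 := rfl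

lemma bestF_nonneg (gs : List (List (Int × Int))) (b : Int) (hok : gsOk gs) (_hb : 0 ≤ b) :
    0 ≤ bestF gs b := by
  cases gs with
  | nil => simp [bestF]
  | cons g t => exact cmax_ge_init g b _ 0

lemma bestF_ge_cand (g : List (Int × Int)) (gs : List (List (Int × Int))) (b : Int)
    (cg : Int × Int) (hm : cg ∈ g) (hc : cg.1 ≤ b) :
    cg.2 + bestF gs (b - cg.1) ≤ bestF (g :: gs) b := by
  exact cmax_ge_mem g b (fun cg => cg.2 + bestF gs (b - cg.1)) 0 cg hm hc

lemma bestF_le_intro (g : List (Int × Int)) (gs : List (List (Int × Int))) (b M : Int)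
    (hM : 0 ≤ M) (h : ∀ cg ∈ g, cg.1 ≤ b → cg.2 + bestF gs (b - cg.1) ≤ M) :
    bestF (g :: gs) b ≤ M := by
  exact cmax_le g b _ 0 M hM h

lemma gsOk_swap {g1 g2 : List (Int × Int)} {gs : List (List (Int × Int))}
    (h : gsOk (g1 :: g2 :: gs)) : gsOk (g2 :: g1 :: gs) := by
  intro g hg
  simp only [List.mem_cons] at hg ⊢
  rcases hg with h1 | h1 | h1 <;> [exact h g (by simp [h1]); exact h g (by simp [h1]); exact h g (by simp [h1])]

lemma bestF_swap_le (g1 g2 : List (Int × Int)) (gs : List (List (Int × Int))) (b : Int)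
    (hok : gsOk (g1 :: g2 :: gs)) (hb : 0 ≤ b) :
    bestF (g1 :: g2 :: gs) b ≤ bestF (g2 :: g1 :: gs) b := by
  have hg1 : grpOk g1 := hok g1 (by simp)
  have hg2 : grpOk g2 := hok g2 (by simp)
  have hgs : gsOk gs := fun g hg => hok g (by simp [hg])
  have hok2 : gsOk (g2 :: g1 :: gs) := gsOk_swap hok
  have hskip2 : (0, 0) ∈ g2 := by obtain ⟨t, ht⟩ := hg2.1; simp [ht]
  have hR0 : 0 ≤ bestF (g2 :: g1 :: gs) b := bestF_nonneg _ b hok2 hb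
  apply bestF_le_intro _ _ _ _ hR0
  intro cg1 hm1 hc1b
  have hc1 : 0 ≤ cg1.1 := (hg1.2 cg1 hm1).1
  have hsub : bestF (g1 :: gs) b ≤ bestF (g2 :: g1 :: gs) b := by
    have := bestF_ge_cand g2 (g1 :: gs) b (0, 0) hskip2 (by simpa using hb)
    simpa using this
  have key1 : cg1.2 ≤ bestF (g2 :: g1 :: gs) b := by
    have h1 : cg1.2 + bestF gs (b - cg1.1) ≤ bestF (g1 :: gs) b := bestF_ge_cand _ _ _ _ hm1 hc1b
    have h2 : 0 ≤ bestF gs (b - cg1.1) := bestF_nonneg _ _ hgs (by omega)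
    linarith
  have main : bestF (g2 :: gs) (b - cg1.1) ≤ bestF (g2 :: g1 :: gs) b - cg1.2 := by
    apply bestF_le_intro _ _ _ _ (by linarith)
    intro cg2 hm2 hc2b
    have hc2 : 0 ≤ cg2.1 := (hg2.2 cg2 hm2).1
    have t1 : cg1.2 + bestF gs (b - cg2.1 - cg1.1) ≤ bestF (g1 :: gs) (b - cg2.1) :=
      bestF_ge_cand _ _ _ _ hm1 (by omega)
    have t2 : cg2.2 + bestF (g1 :: gs) (b - cg2.1) ≤ bestF (g2 :: g1 :: gs) b :=
      bestF_ge_cand _ _ _ _ hm2 (by omega)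
    have harg : b - cg1.1 - cg2.1 = b - cg2.1 - cg1.1 := by ring
    rw [harg]
    linarith
  linarith

lemma bestF_swap (g1 g2 : List (Int × Int)) (gs : List (List (Int × Int))) (b : Int)
    (hok : gsOk (g1 :: g2 :: gs)) (hb : 0 ≤ b) :
    bestF (g1 :: g2 :: gs) b = bestF (g2 :: g1 :: gs) b :=
  le_antisymm (bestF_swap_le g1 g2 gs b hok hb) (bestF_swap_le g2 g1 gs b (gsOk_swap hok) hb)

lemma bestF_append_singleton (gs : List (List (Int × Int))) (g : List (Int × Int)) (b : Int)
    (hok : gsOk (g :: gs)) (hb : 0 ≤ b) :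
    bestF (gs ++ [g]) b = bestF (g :: gs) b := by
  induction gs generalizing b with
  | nil => rfl
  | cons g' t ih =>
    have hok' : gsOk (g :: t) := by
      intro x hx; apply hok; rcases List.mem_cons.mp hx with h | h <;> simp [h]
    have hg' : grpOk g' := hok g' (by simp)
    have step1 : bestF (g' :: (t ++ [g])) b = bestF (g' :: g :: t) b := by
      rw [bestF_cons, bestF_cons]
      apply cmax_congr
      intro cg hm hc
      have hc0 : 0 ≤ cg.1 := (hg'.2 cg hm).1
      rw [ih (b - cg.1) hok' (by omega)]
    have hokPerm : gsOk (g' :: g :: t) := by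
      intro x hx
      apply hok
      simp only [List.mem_cons] at hx ⊢
      tauto
    calc bestF ((g' :: t) ++ [g]) b = bestF (g' :: g :: t) b := step1
      _ = bestF (g :: g' :: t) b := bestF_swap g' g t b hokPerm hb

lemma bestF_reverse (gs : List (List (Int × Int))) (b : Int) (hok : gsOk gs) (hb : 0 ≤ b) :
    bestF gs.reverse b = bestF gs b := by
  induction gs generalizing b with
  | nil => rfl
  | cons g t ih =>
    have hg : grpOk g := hok g (by simp)
    have ht : gsOk t := fun x hx => hok x (by simp [hx])
    have htr : gsOk (g :: t.reverse) := by
      intro x hx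
      rcases List.mem_cons.mp hx with h | h
      · simpa [h] using hg
      · exact ht x (List.mem_reverse.mp h)
    calc bestF (g :: t).reverse b = bestF (t.reverse ++ [g]) b := by simp
      _ = bestF (g :: t.reverse) b := bestF_append_singleton _ _ _ htr hb
      _ = bestF (g :: t) b := by
          rw [bestF_cons, bestF_cons]
          apply cmax_congr
          intro cg hm hc
          have hc0 : 0 ≤ cg.1 := (hg.2 cg hm).1
          rw [ih (b - cg.1) ht (by omega)]

lemma bestF_cons_of_costs_gt (g : List (Int × Int)) (gs : List (List (Int × Int))) (b : Int)
    (hok : gsOk (g :: gs)) (hb : 0 ≤ b) (hcost : ∀ cg ∈ g, cg.1 ≠ 0 → b < cg.1) :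
    bestF (g :: gs) b = bestF gs b := by
  have hg : grpOk g := hok g (by simp)
  have ht : gsOk gs := fun x hx => hok x (by simp [hx])
  apply le_antisymm
  · apply bestF_le_intro _ _ _ _ (bestF_nonneg _ _ ht hb)
    intro cg hm hc
    by_cases h0 : cg.1 = 0
    · have := (hg.2 cg hm).2 h0
      simp [h0, this]
    · exact absurd hc (by have := hcost cg hm h0; omega)
  · have hskip : (0, 0) ∈ g := by obtain ⟨t, htt⟩ := hg.1; simp [htt]
    have := bestF_ge_cand g gs b (0, 0) hskip (by simpa using hb)
    simpa using this

-- ---- B side: the memoized recursion computes bestF ----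

def memoOk (groups : List (List (Int × Int))) (memo : PySem.Dict (Int × Int) Int) : Prop :=
  ∀ i b v, memo.get? (i, b) = some v → 0 ≤ i ∧ v = bestF (groups.drop i.toNat) b

lemma bFold_spec (groups : List (List (Int × Int))) (rest' : List (List (Int × Int))) (i budget : Int)
    (IH : ∀ b' memo, 0 ≤ b' → memoOk groups memo →
      (bSolve rest' (i + 1) b' memo).1 = bestF rest' b' ∧ memoOk groups (bSolve rest' (i + 1) b' memo).2) :
    ∀ (g : List (Int × Int)) (acc : Option Int) (memo : PySem.Dict (Int × Int) Int),
      0 ≤ budget → memoOk groups memo →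
      (bFold g rest' i budget (acc, memo)).1
          = g.foldl (fun a cg => if cg.1 ≤ budget then
              (match a with
               | none => some (cg.2 + bestF rest' (budget - cg.1))
               | some x => some (max x (cg.2 + bestF rest' (budget - cg.1)))) else a) acc
        ∧ memoOk groups (bFold g rest' i budget (acc, memo)).2 := by
  intro g
  induction g with
  | nil => intro acc memo _ hmok; simp only [bFold, List.foldl_nil]; exact ⟨trivial, hmok⟩
  | cons cg t ih =>
    intro acc memo hb hmok
    simp only [bFold, List.foldl_cons]
    by_cases hc : cg.1 ≤ budget
    · simp only [if_pos hc]
      obtain ⟨hs1, hs2⟩ := IH (budget - cg.1) memo (by omega) hmok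
      rw [hs1] at *
      exact ih _ _ hb hs2
    · simp only [if_neg hc]
      exact ih _ _ hb hmok

lemma ofold_some (g : List (Int × Int)) (gs : List (List (Int × Int))) (b a : Int) :
    g.foldl (fun acc cg => if cg.1 ≤ b then
        (match acc with
         | none => some (cg.2 + bestF gs (b - cg.1))
         | some x => some (max x (cg.2 + bestF gs (b - cg.1)))) else acc) (some a)
      = some (g.foldl (fun acc cg => if cg.1 ≤ b then max acc (cg.2 + bestF gs (b - cg.1)) else acc) a) := by
  induction g generalizing a with
  | nil => rfl
  | cons cg t ih =>
    simp only [List.foldl_cons]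
    by_cases hc : cg.1 ≤ b
    · simp only [if_pos hc]
      exact ih _
    · simp only [if_neg hc]
      exact ih _

lemma ofold_skip_head (g : List (Int × Int)) (gs : List (List (Int × Int))) (b : Int)
    (hg : grpOk g) (hgs : gsOk gs) (hb : 0 ≤ b) :
    g.foldl (fun acc cg => if cg.1 ≤ b then
        (match acc with
         | none => some (cg.2 + bestF gs (b - cg.1))
         | some x => some (max x (cg.2 + bestF gs (b - cg.1)))) else acc) none
      = some (bestF (g :: gs) b) := by
  obtain ⟨t, ht⟩ := hg.1
  subst ht
  rw [bestF_cons]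
  simp only [List.foldl_cons, if_pos hb]
  rw [ofold_some]
  congr 1
  have h0 : (0 : Int) + bestF gs (b - 0) = bestF gs b := by norm_num
  rw [h0]
  congr 1
  have := bestF_nonneg gs b hgs hb
  omega

lemma bSolve_spec (groups : List (List (Int × Int))) (hok : gsOk groups) :
    ∀ (rest : List (List (Int × Int))) (i budget : Int) (memo : PySem.Dict (Int × Int) Int),
      rest = groups.drop i.toNat → 0 ≤ i → 0 ≤ budget → memoOk groups memo →
      (bSolve rest i budget memo).1 = bestF rest budget ∧ memoOk groups (bSolve rest i budget memo).2 := by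
  intro rest
  induction rest with
  | nil =>
    intro i budget memo _ _ _ hmok
    simp only [bSolve]
    exact ⟨rfl, hmok⟩
  | cons g rest' ih =>
    intro i budget memo hrest hi hb hmok
    have hdrop : rest' = groups.drop (i + 1).toNat := by
      have h1 : (i + 1).toNat = i.toNat + 1 := by omega
      rw [h1, ← List.tail_drop, ← hrest]
      rfl
    have hgmem : ∀ x ∈ g :: rest', x ∈ groups := by
      intro x hx
      have : x ∈ groups.drop i.toNat := by rw [← hrest]; exact hx
      exact List.mem_of_mem_drop this
    have hg : grpOk g := hok g (hgmem g (by simp))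
    have hrs : gsOk rest' := fun x hx => hok x (hgmem x (by simp [hx]))
    cases hm : memo.get? (i, budget) with
    | some v =>
      refine ⟨?_, ?_⟩
      · show (bSolve (g :: rest') i budget memo).1 = _
        simp only [bSolve, hm]
        have := (hmok i budget v hm).2
        rw [← hrest] at this
        exact this
      · show memoOk groups (bSolve (g :: rest') i budget memo).2
        simp only [bSolve, hm]
        exact hmok
    | none =>
      have IH' : ∀ b' memo', 0 ≤ b' → memoOk groups memo' →
          (bSolve rest' (i + 1) b' memo').1 = bestF rest' b' ∧ memoOk groups (bSolve rest' (i + 1) b' memo').2 :=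
        fun b' memo' hb' hmok' => ih (i + 1) b' memo' hdrop (by omega) hb' hmok'
      obtain ⟨hf1, hf2⟩ := bFold_spec groups rest' i budget IH' g none memo hb hmok
      have hfv : (bFold g rest' i budget (none, memo)).1 = some (bestF (g :: rest') budget) := by
        rw [hf1]; exact ofold_skip_head g rest' budget hg hrs hb
      refine ⟨?_, ?_⟩
      · show (bSolve (g :: rest') i budget memo).1 = _
        simp only [bSolve, hm, hfv]
      · show memoOk groups (bSolve (g :: rest') i budget memo).2
        simp only [bSolve, hm, hfv]
        intro i' b' v' hget
        rw [PySem.Dict.get?_insert] at hget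
        split at hget
        · rename_i heq
          have hii : i' = i := congrArg Prod.fst heq
          have hbb : b' = budget := congrArg Prod.snd heq
          have hv' : v' = bestF (g :: rest') budget := by
            injection hget with h; omega
          refine ⟨hii ▸ hi, ?_⟩
          rw [hii, hbb, hv', ← hrest]
        · exact hf2 i' b' v' hget

-- ---- A side: the descending in-place sweep computes bestF ----

lemma dpGet_set (dp : List Int) (i j x : Int) (hi0 : 0 ≤ i) (_hi : i < (dp.length : Int))
    (hj0 : 0 ≤ j) (hj : j < (dp.length : Int)) :
    PySem.List.pyGetD (PySem.List.pySetD dp i x) j 0 = if j = i then x else PySem.List.pyGetD dp j 0 := by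
  rw [PySem.List.pySetD_of_nonneg dp x hi0]
  rw [PySem.List.pyGetD_eq_getElem _ _ hj0 (by simpa using hj)]
  rw [List.getElem_set]
  by_cases h : j = i
  · rw [if_pos h, if_pos (by omega)]
  · rw [if_neg h, if_neg (by omega), PySem.List.pyGetD_eq_getElem _ _ hj0 hj]

lemma len_aStmt (dp : List Int) (b c γ : Int) : (aStmt dp b c γ).length = dp.length := by
  unfold aStmt
  split
  · exact PySem.List.length_pySetD dp b _
  · rfl

lemma aStmt_spec (dp : List Int) (gs : List (List (Int × Int))) (b c γ : Int)
    (hb0 : 0 ≤ b) (hb : b < (dp.length : Int)) (hc : 0 ≤ c) (hcγ : c = 0 → γ = 0)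
    (hlow : ∀ j, 0 ≤ j → j < b → PySem.List.pyGetD dp j 0 = bestF gs j)
    (hge : bestF gs b ≤ PySem.List.pyGetD dp b 0) :
    (∀ j, 0 ≤ j → j < (dp.length : Int) → j ≠ b → PySem.List.pyGetD (aStmt dp b c γ) j 0 = PySem.List.pyGetD dp j 0)
    ∧ PySem.List.pyGetD (aStmt dp b c γ) b 0
        = (if c ≤ b then max (PySem.List.pyGetD dp b 0) (γ + bestF gs (b - c)) else PySem.List.pyGetD dp b 0) := by
  unfold aStmt
  by_cases hcb : b ≥ c
  · rw [if_pos hcb]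
    constructor
    · intro j hj0 hjlen hjb
      rw [dpGet_set dp b j _ hb0 hb hj0 hjlen, if_neg hjb]
    · rw [dpGet_set dp b b _ hb0 hb hb0 hb, if_pos rfl, if_pos (by omega)]
      by_cases h0 : c = 0
      · have hγ : γ = 0 := hcγ h0
        subst h0; subst hγ
        have : b - 0 = b := by ring
        rw [this]
        have hle : bestF gs b ≤ PySem.List.pyGetD dp b 0 := hge
        omega
      · have : PySem.List.pyGetD dp (b - c) 0 = bestF gs (b - c) := hlow (b - c) (by omega) (by omega)
        rw [this]
        omega
  · rw [if_neg hcb, if_neg (by omega)]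
    exact ⟨fun j _ _ _ => rfl, rfl⟩

-- sequential guarded max-update statements at index b = one fold of bestF's step over the same options
lemma aChain_spec (os : List (Int × Int)) (dp : List Int) (gs : List (List (Int × Int))) (b : Int)
    (hb0 : 0 ≤ b) (hb : b < (dp.length : Int))
    (hok : ∀ cg ∈ os, optOk cg)
    (hlow : ∀ j, 0 ≤ j → j < b → PySem.List.pyGetD dp j 0 = bestF gs j)
    (hge : bestF gs b ≤ PySem.List.pyGetD dp b 0) :
    (os.foldl (fun dp cg => aStmt dp b cg.1 cg.2) dp).length = dp.length
    ∧ (∀ j, 0 ≤ j → j < (dp.length : Int) → j ≠ b →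
        PySem.List.pyGetD (os.foldl (fun dp cg => aStmt dp b cg.1 cg.2) dp) j 0 = PySem.List.pyGetD dp j 0)
    ∧ PySem.List.pyGetD (os.foldl (fun dp cg => aStmt dp b cg.1 cg.2) dp) b 0
        = os.foldl (fun acc cg => if cg.1 ≤ b then max acc (cg.2 + bestF gs (b - cg.1)) else acc)
            (PySem.List.pyGetD dp b 0) := by
  induction os generalizing dp with
  | nil => exact ⟨rfl, fun _ _ _ _ => rfl, rfl⟩
  | cons cg os' ih =>
    obtain ⟨hc0, hcγ⟩ := hok cg (by simp)
    obtain ⟨hSne, hSb⟩ := aStmt_spec dp gs b cg.1 cg.2 hb0 hb hc0 hcγ hlow hge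
    have hlen1 : (aStmt dp b cg.1 cg.2).length = dp.length := len_aStmt dp b cg.1 cg.2
    have hb1 : b < ((aStmt dp b cg.1 cg.2).length : Int) := by rw [hlen1]; exact hb
    have hlow1 : ∀ j, 0 ≤ j → j < b → PySem.List.pyGetD (aStmt dp b cg.1 cg.2) j 0 = bestF gs j := by
      intro j hj0 hjb
      rw [hSne j hj0 (by omega) (by omega)]
      exact hlow j hj0 hjb
    have hge1 : bestF gs b ≤ PySem.List.pyGetD (aStmt dp b cg.1 cg.2) b 0 := by
      rw [hSb]
      split
      · exact le_trans hge (le_max_left _ _)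
      · exact hge
    obtain ⟨ih1, ih2, ih3⟩ := ih (aStmt dp b cg.1 cg.2)
      (by rw [hlen1]; exact hb)
      (fun cg' hm => hok cg' (by simp [hm])) hlow1 hge1
    refine ⟨?_, ?_, ?_⟩
    · simp only [List.foldl_cons]
      rw [ih1, hlen1]
    · intro j hj0 hjlen hjb
      simp only [List.foldl_cons]
      rw [ih2 j hj0 (by rw [hlen1]; exact hjlen) hjb, hSne j hj0 hjlen hjb]
    · simp only [List.foldl_cons]
      rw [ih3, hSb]

-- shape of a group's option list
lemma bOptions_shape (v p : Int) (atts : List (Int × Int × Int)) :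
    bOptions v p atts = (0, 0) :: (v, v * p) ::
      (match atts with
       | [] => []
       | [a0] => [(v + a0.2.1, v * p + a0.2.1 * a0.2.2)]
       | a0 :: a1 :: _ => [(v + a0.2.1, v * p + a0.2.1 * a0.2.2),
                           (v + a1.2.1, v * p + a1.2.1 * a1.2.2),
                           (v + a0.2.1 + a1.2.1, v * p + a0.2.1 * a0.2.2 + a1.2.1 * a1.2.2)]) := by
  unfold bOptions
  rw [PySem.List.slice_to atts (by norm_num)]
  match atts with
  | [] => simp
  | [a0] => simp [PySem.List.len]
  | a0 :: a1 :: t =>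
    have h2 : (2 : Int).toNat = 2 := rfl
    rw [h2]
    simp [PySem.List.len, List.take]

lemma bOptions_grpOk (v p : Int) (atts : List (Int × Int × Int))
    (hv : 0 ≤ v) (hatt : ∀ a ∈ atts, 0 ≤ a.2.1) : grpOk (bOptions v p atts) := by
  rw [bOptions_shape]
  constructor
  · exact ⟨_, rfl⟩
  · intro cg hm
    match atts with
    | [] =>
      simp only [List.mem_cons, List.not_mem_nil, or_false] at hm
      rcases hm with h | h <;> subst h
      · exact ⟨le_refl 0, fun _ => rfl⟩
      · refine ⟨hv, fun h0 => ?_⟩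
        have hv0 : v = 0 := h0
        show v * p = 0
        rw [hv0]; ring
    | [a0] =>
      have ha0 : 0 ≤ a0.2.1 := hatt a0 (by simp)
      simp only [List.mem_cons, List.not_mem_nil, or_false] at hm
      rcases hm with h | h | h <;> subst h
      · exact ⟨le_refl 0, fun _ => rfl⟩
      · refine ⟨hv, fun h0 => ?_⟩
        have hv0 : v = 0 := h0
        show v * p = 0
        rw [hv0]; ring
      · refine ⟨by omega, fun h0 => ?_⟩
        have hs : v + a0.2.1 = 0 := h0
        have h1 : v = 0 := by omega
        have h2 : a0.2.1 = 0 := by omega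
        show v * p + a0.2.1 * a0.2.2 = 0
        rw [h1, h2]; ring
    | a0 :: a1 :: t =>
      have ha0 : 0 ≤ a0.2.1 := hatt a0 (by simp)
      have ha1 : 0 ≤ a1.2.1 := hatt a1 (by simp)
      simp only [List.mem_cons, List.not_mem_nil, or_false] at hm
      rcases hm with h | h | h | h | h <;> subst h
      · exact ⟨le_refl 0, fun _ => rfl⟩
      · refine ⟨hv, fun h0 => ?_⟩
        have hv0 : v = 0 := h0
        show v * p = 0
        rw [hv0]; ring
      · refine ⟨by omega, fun h0 => ?_⟩
        have hs : v + a0.2.1 = 0 := h0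
        have h1 : v = 0 := by omega
        have h2 : a0.2.1 = 0 := by omega
        show v * p + a0.2.1 * a0.2.2 = 0
        rw [h1, h2]; ring
      · refine ⟨by omega, fun h0 => ?_⟩
        have hs : v + a1.2.1 = 0 := h0
        have h1 : v = 0 := by omega
        have h2 : a1.2.1 = 0 := by omega
        show v * p + a1.2.1 * a1.2.2 = 0
        rw [h1, h2]; ring
      · refine ⟨by omega, fun h0 => ?_⟩
        have hs : v + a0.2.1 + a1.2.1 = 0 := h0
        have h1 : v = 0 := by omega
        have h2 : a0.2.1 = 0 := by omega
        have h3 : a1.2.1 = 0 := by omega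
        show v * p + a0.2.1 * a0.2.2 + a1.2.1 * a1.2.2 = 0
        rw [h1, h2, h3]; ring

lemma bOptions_costs (v p : Int) (atts : List (Int × Int × Int))
    (hatt : ∀ a ∈ atts, 0 ≤ a.2.1) :
    ∀ cg ∈ bOptions v p atts, cg.1 = 0 ∨ v ≤ cg.1 := by
  rw [bOptions_shape]
  intro cg hm
  match atts with
  | [] =>
    simp only [List.mem_cons, List.not_mem_nil, or_false] at hm
    rcases hm with h | h <;> subst h <;> simp
  | [a0] =>
    have ha0 : 0 ≤ a0.2.1 := hatt a0 (by simp)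
    simp only [List.mem_cons, List.not_mem_nil, or_false] at hm
    rcases hm with h | h | h <;> subst h <;> (simp; try omega)
  | a0 :: a1 :: t =>
    have ha0 : 0 ≤ a0.2.1 := hatt a0 (by simp)
    have ha1 : 0 ≤ a1.2.1 := hatt a1 (by simp)
    simp only [List.mem_cons, List.not_mem_nil, or_false] at hm
    rcases hm with h | h | h | h | h <;> subst h <;> (simp; try omega)

lemma aBody_spec (al? : Option (List (Int × Int × Int))) (v p b : Int)
    (gs : List (List (Int × Int))) (dp : List Int)
    (hv : 0 ≤ v) (hvb : v ≤ b) (hb : b < (dp.length : Int))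
    (hatt : ∀ a ∈ al?.getD [], 0 ≤ a.2.1)
    (hgs : gsOk gs)
    (hdp : ∀ j, 0 ≤ j → j ≤ b → PySem.List.pyGetD dp j 0 = bestF gs j) :
    (aBody al? v p dp b).length = dp.length
    ∧ (∀ j, 0 ≤ j → j < (dp.length : Int) → j ≠ b → PySem.List.pyGetD (aBody al? v p dp b) j 0 = PySem.List.pyGetD dp j 0)
    ∧ PySem.List.pyGetD (aBody al? v p dp b) b 0 = bestF (bOptions v p (al?.getD []) :: gs) b := by
  have hb0 : 0 ≤ b := le_trans hv hvb
  have hBF0 : 0 ≤ bestF gs b := bestF_nonneg gs b hgs hb0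
  have hlow : ∀ j, 0 ≤ j → j < b → PySem.List.pyGetD dp j 0 = bestF gs j :=
    fun j h1 h2 => hdp j h1 (by omega)
  have hacc : PySem.List.pyGetD dp b 0 = bestF gs b := hdp b hb0 le_rfl
  have hge : bestF gs b ≤ PySem.List.pyGetD dp b 0 := le_of_eq hacc.symm
  have hmain : optOk (v, v * p) := ⟨hv, fun h0 => by
    have hv0 : v = 0 := h0
    show v * p = 0
    rw [hv0]; ring⟩
  cases al? with
  | none =>
    have hbody : aBody none v p dp b
        = [((v : Int), v * p)].foldl (fun dp cg => aStmt dp b cg.1 cg.2) dp := rfl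
    obtain ⟨h1, h2, h3⟩ := aChain_spec [(v, v * p)] dp gs b hb0 hb
      (by intro cg hm; simp only [List.mem_cons, List.not_mem_nil, or_false] at hm; rw [hm]; exact hmain)
      hlow hge
    refine ⟨hbody ▸ h1, fun j a bb c => hbody ▸ h2 j a bb c, ?_⟩
    rw [hbody, h3, hacc]
    rw [show (Option.getD (none : Option (List (Int × Int × Int))) []) = [] from rfl]
    rw [bOptions_shape, bestF_cons]
    simp only [List.foldl_cons, List.foldl_nil]
    rw [if_pos (show ((v : Int), v * p).1 ≤ b from hvb),
        if_pos (show (((0 : Int), (0 : Int))).1 ≤ b from hb0),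
        if_pos (show ((v : Int), v * p).1 ≤ b from hvb)]
    norm_num
    exact Or.inl hBF0
  | some al =>
    rcases al with _ | ⟨a0, _ | ⟨a1, t⟩⟩
    · -- al = [] (unreachable from the programs; the default lookup duplicates the main-only update)
      have hbody : aBody (some []) v p dp b
          = [((v : Int), v * p), (v + 0, v * p + 0 * 0)].foldl (fun dp cg => aStmt dp b cg.1 cg.2) dp := rfl
      obtain ⟨h1, h2, h3⟩ := aChain_spec [(v, v * p), (v + 0, v * p + 0 * 0)] dp gs b hb0 hb
        (by
          intro cg hm
          simp only [List.mem_cons, List.not_mem_nil, or_false] at hm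
          rcases hm with h | h <;> rw [h]
          · exact hmain
          · refine ⟨by omega, fun h0 => ?_⟩
            have hv0 : v + 0 = 0 := h0
            show v * p + 0 * 0 = 0
            have : v = 0 := by omega
            rw [this]; ring)
        hlow hge
      refine ⟨hbody ▸ h1, fun j a bb c => hbody ▸ h2 j a bb c, ?_⟩
      rw [hbody, h3, hacc]
      rw [show (Option.getD (some ([] : List (Int × Int × Int))) []) = [] from rfl]
      rw [bOptions_shape, bestF_cons]
      simp only [List.foldl_cons, List.foldl_nil]
      rw [if_pos (show ((v : Int), v * p).1 ≤ b from hvb),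
          if_pos (show ((v + (0 : Int)), v * p + 0 * 0).1 ≤ b from by simpa using hvb),
          if_pos (show (((0 : Int), (0 : Int))).1 ≤ b from hb0),
          if_pos (show ((v : Int), v * p).1 ≤ b from hvb)]
      norm_num
      exact Or.inl hBF0
    · -- al = [a0]
      have ha0 : 0 ≤ a0.2.1 := hatt a0 (by simp)
      have hbody : aBody (some [a0]) v p dp b
          = [((v : Int), v * p), (v + a0.2.1, v * p + a0.2.1 * a0.2.2)].foldl
              (fun dp cg => aStmt dp b cg.1 cg.2) dp := rfl
      obtain ⟨h1, h2, h3⟩ := aChain_spec [(v, v * p), (v + a0.2.1, v * p + a0.2.1 * a0.2.2)] dp gs b hb0 hb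
        (by
          intro cg hm
          simp only [List.mem_cons, List.not_mem_nil, or_false] at hm
          rcases hm with h | h <;> rw [h]
          · exact hmain
          · refine ⟨by omega, fun h0 => ?_⟩
            have hv0 : v + a0.2.1 = 0 := h0
            have e1 : v = 0 := by omega
            have e2 : a0.2.1 = 0 := by omega
            show v * p + a0.2.1 * a0.2.2 = 0
            rw [e1, e2]; ring)
        hlow hge
      refine ⟨hbody ▸ h1, fun j a bb c => hbody ▸ h2 j a bb c, ?_⟩
      rw [hbody, h3, hacc]
      rw [show (Option.getD (some [a0]) []) = [a0] from rfl]
      rw [bOptions_shape, bestF_cons]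
      simp only [List.foldl_cons, List.foldl_nil]
      rw [if_pos (show (((0 : Int), (0 : Int))).1 ≤ b from hb0)]
      norm_num
      have hmx : ∀ X : Int, max 0 (max (bestF gs b) X) = max (bestF gs b) X :=
        fun X => max_eq_right (le_trans hBF0 (le_max_left _ _))
      simp only [hmx, max_eq_right hBF0]
    · -- al = a0 :: a1 :: t
      have ha0 : 0 ≤ a0.2.1 := hatt a0 (by simp)
      have ha1 : 0 ≤ a1.2.1 := hatt a1 (by simp)
      have hbody : aBody (some (a0 :: a1 :: t)) v p dp b
          = [((v : Int), v * p), (v + a0.2.1, v * p + a0.2.1 * a0.2.2),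
             (v + a1.2.1, v * p + a1.2.1 * a1.2.2),
             (v + a0.2.1 + a1.2.1, v * p + a0.2.1 * a0.2.2 + a1.2.1 * a1.2.2)].foldl
              (fun dp cg => aStmt dp b cg.1 cg.2) dp := by
        have hg0 : PySem.List.pyGet? (a0 :: a1 :: t) 0 = some a0 := PySem.List.pyGet?_zero_cons _ _
        have hg1 : PySem.List.pyGet? (a0 :: a1 :: t) 1 = some a1 := by simp [pysem]
        show aBody (some (a0 :: a1 :: t)) v p dp b = _
        simp only [aBody, hg0, hg1, Option.getD_some]
        rw [if_pos (show PySem.List.len (a0 :: a1 :: t) > 1 from by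
          simp [PySem.List.len])]
        simp [List.foldl]
      obtain ⟨h1, h2, h3⟩ := aChain_spec
        [((v : Int), v * p), (v + a0.2.1, v * p + a0.2.1 * a0.2.2),
         (v + a1.2.1, v * p + a1.2.1 * a1.2.2),
         (v + a0.2.1 + a1.2.1, v * p + a0.2.1 * a0.2.2 + a1.2.1 * a1.2.2)] dp gs b hb0 hb
        (by
          intro cg hm
          simp only [List.mem_cons, List.not_mem_nil, or_false] at hm
          rcases hm with h | h | h | h <;> rw [h]
          · exact hmain
          · refine ⟨by omega, fun h0 => ?_⟩
            have hv0 : v + a0.2.1 = 0 := h0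
            have e1 : v = 0 := by omega
            have e2 : a0.2.1 = 0 := by omega
            show v * p + a0.2.1 * a0.2.2 = 0
            rw [e1, e2]; ring
          · refine ⟨by omega, fun h0 => ?_⟩
            have hv0 : v + a1.2.1 = 0 := h0
            have e1 : v = 0 := by omega
            have e2 : a1.2.1 = 0 := by omega
            show v * p + a1.2.1 * a1.2.2 = 0
            rw [e1, e2]; ring
          · refine ⟨by omega, fun h0 => ?_⟩
            have hv0 : v + a0.2.1 + a1.2.1 = 0 := h0
            have e1 : v = 0 := by omega
            have e2 : a0.2.1 = 0 := by omega
            have e3 : a1.2.1 = 0 := by omega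
            show v * p + a0.2.1 * a0.2.2 + a1.2.1 * a1.2.2 = 0
            rw [e1, e2, e3]; ring)
        hlow hge
      refine ⟨hbody ▸ h1, fun j a bb c => hbody ▸ h2 j a bb c, ?_⟩
      rw [hbody, h3, hacc]
      rw [show (Option.getD (some (a0 :: a1 :: t)) []) = a0 :: a1 :: t from rfl]
      rw [bOptions_shape, bestF_cons]
      simp only [List.foldl_cons, List.foldl_nil]
      rw [if_pos (show (((0 : Int), (0 : Int))).1 ≤ b from hb0)]
      norm_num
      have hmx : ∀ X : Int, max 0 (max (bestF gs b) X) = max (bestF gs b) X :=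
        fun X => max_eq_right (le_trans hBF0 (le_max_left _ _))
      simp only [hmx, max_eq_right hBF0]

lemma sweep_aux (N v p : Int) (al? : Option (List (Int × Int × Int)))
    (gs : List (List (Int × Int)))
    (hv : 0 ≤ v) (hatt : ∀ a ∈ al?.getD [], 0 ≤ a.2.1) (hgs : gsOk gs) :
    ∀ (k : Nat) (s : Int) (dp : List Int),
      s = v - 1 + (k : Int) → s ≤ N → dp.length = (N + 1).toNat →
      (∀ j, 0 ≤ j → j ≤ N → PySem.List.pyGetD dp j 0
          = if s < j then bestF (bOptions v p (al?.getD []) :: gs) j else bestF gs j) →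
      ((PySem.List.pyRange s (v - 1) (-1)).foldl (aBody al? v p) dp).length = dp.length
      ∧ ∀ j, 0 ≤ j → j ≤ N →
          PySem.List.pyGetD ((PySem.List.pyRange s (v - 1) (-1)).foldl (aBody al? v p) dp) j 0
            = if v - 1 < j then bestF (bOptions v p (al?.getD []) :: gs) j else bestF gs j := by
  intro k
  induction k with
  | zero =>
    intro s dp hs _ _ hinv
    rw [PySem.List.pyRange_neg_one_eq_nil (by omega)]
    refine ⟨rfl, ?_⟩
    intro j hj0 hjN
    simpa [show s = v - 1 from by omega] using hinv j hj0 hjN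
  | succ k ih =>
    intro s dp hs hsN hlen hinv
    have hk : (((k : Nat) + 1 : Nat) : Int) = (k : Int) + 1 := by push_cast; ring
    have hvs : v ≤ s := by omega
    have h0s : 0 ≤ s := by omega
    have h0N : 0 ≤ N := by omega
    have hblt : s < (dp.length : Int) := by omega
    obtain ⟨hB1, hB2, hB3⟩ := aBody_spec al? v p s gs dp hv hvs hblt hatt hgs
      (fun j hj0 hjs => by
        have := hinv j hj0 (by omega)
        rwa [if_neg (by omega)] at this)
    rw [PySem.List.pyRange_neg_one_cons (by omega)]
    simp only [List.foldl_cons]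
    have hlen1 : (aBody al? v p dp s).length = (N + 1).toNat := by rw [hB1, hlen]
    have hinv1 : ∀ j, 0 ≤ j → j ≤ N → PySem.List.pyGetD (aBody al? v p dp s) j 0
        = if s - 1 < j then bestF (bOptions v p (al?.getD []) :: gs) j else bestF gs j := by
      intro j hj0 hjN
      by_cases hjs : j = s
      · rw [hjs, if_pos (by omega)]
        exact hB3
      · rw [hB2 j hj0 (by omega) hjs]
        have hh := hinv j hj0 hjN
        by_cases hlt : s < j
        · rw [if_pos hlt] at hh
          rw [if_pos (by omega)]
          exact hh
        · rw [if_neg hlt] at hh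
          rw [if_neg (by omega)]
          exact hh
    obtain ⟨hI1, hI2⟩ := ih (s - 1) (aBody al? v p dp s) (by omega) (by omega) hlen1 hinv1
    refine ⟨?_, hI2⟩
    rw [hI1, hB1]

lemma sweep_spec (N v p : Int) (al? : Option (List (Int × Int × Int)))
    (gs : List (List (Int × Int))) (dp : List Int)
    (hlen : dp.length = (N + 1).toNat) (_hN : 0 ≤ N) (hv : 0 ≤ v)
    (hatt : ∀ a ∈ al?.getD [], 0 ≤ a.2.1) (hgs : gsOk gs)
    (hdp : ∀ j, 0 ≤ j → j ≤ N → PySem.List.pyGetD dp j 0 = bestF gs j) :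
    ((PySem.List.pyRange N (v - 1) (-1)).foldl (aBody al? v p) dp).length = dp.length
    ∧ ∀ j, 0 ≤ j → j ≤ N →
        PySem.List.pyGetD ((PySem.List.pyRange N (v - 1) (-1)).foldl (aBody al? v p) dp) j 0
          = bestF (bOptions v p (al?.getD []) :: gs) j := by
  have hgOk : grpOk (bOptions v p (al?.getD [])) := bOptions_grpOk v p _ hv hatt
  have hcons : gsOk (bOptions v p (al?.getD []) :: gs) := by
    intro x hx
    rcases List.mem_cons.mp hx with h | h
    · rwa [h]
    · exact hgs x h
  have hsmall : ∀ j, 0 ≤ j → j < v →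
      bestF (bOptions v p (al?.getD []) :: gs) j = bestF gs j := by
    intro j hj0 hjv
    apply bestF_cons_of_costs_gt _ _ _ hcons hj0
    intro cg hm hne
    rcases bOptions_costs v p _ hatt cg hm with h | h
    · exact absurd h hne
    · omega
  by_cases hvN : v ≤ N
  · have hk : ((N - v + 1).toNat : Int) = N - v + 1 := by omega
    obtain ⟨h1, h2⟩ := sweep_aux N v p al? gs hv hatt hgs (N - v + 1).toNat N dp
      (by omega) le_rfl hlen
      (fun j hj0 hjN => by rw [if_neg (by omega)]; exact hdp j hj0 hjN)
    refine ⟨h1, ?_⟩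
    intro j hj0 hjN
    rw [h2 j hj0 hjN]
    by_cases hjv : v - 1 < j
    · rw [if_pos hjv]
    · rw [if_neg hjv, hsmall j hj0 (by omega)]
  · rw [PySem.List.pyRange_neg_one_eq_nil (by omega)]
    refine ⟨rfl, ?_⟩
    intro j hj0 hjN
    rw [List.foldl_nil, hdp j hj0 hjN, hsmall j hj0 (by omega)]

-- the item-splitting loop only ever stores items[i] (i < m) in mains/attach, so all stored prices are ≥ 0
lemma build_inv (items : List (Int × Int × Int)) (m : Int)
    (hm : m ≤ (items.length : Int)) (hpre : ∀ x ∈ items.take m.toNat, 0 ≤ x.1) :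
    (∀ mi ∈ ((PySem.List.pyRange 0 m 1).foldl
        (fun (st : List (Int × Int × Int) × PySem.Dict Int (List (Int × Int × Int))) i =>
          let t := (PySem.List.pyGet? items i).getD (0, 0, 0)
          if t.2.2 = 0 then (st.1 ++ [(i + 1, t.1, t.2.1)], st.2)
          else (st.1, st.2.modify t.2.2 [] (fun l => l ++ [(i + 1, t.1, t.2.1)])))
        ([], PySem.Dict.empty)).1, 0 ≤ mi.2.1)
    ∧ (∀ q, ∀ a ∈ (((PySem.List.pyRange 0 m 1).foldl
        (fun (st : List (Int × Int × Int) × PySem.Dict Int (List (Int × Int × Int))) i =>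
          let t := (PySem.List.pyGet? items i).getD (0, 0, 0)
          if t.2.2 = 0 then (st.1 ++ [(i + 1, t.1, t.2.1)], st.2)
          else (st.1, st.2.modify t.2.2 [] (fun l => l ++ [(i + 1, t.1, t.2.1)])))
        ([], PySem.Dict.empty)).2).getD q [], 0 ≤ a.2.1) := by
  have key : ∀ (l : List Int) (st : List (Int × Int × Int) × PySem.Dict Int (List (Int × Int × Int))),
      (∀ i ∈ l, 0 ≤ i ∧ i < m) →
      (∀ mi ∈ st.1, 0 ≤ mi.2.1) → (∀ q, ∀ a ∈ st.2.getD q [], 0 ≤ a.2.1) →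
      (∀ mi ∈ (l.foldl (fun (st : List (Int × Int × Int) × PySem.Dict Int (List (Int × Int × Int))) i =>
          let t := (PySem.List.pyGet? items i).getD (0, 0, 0)
          if t.2.2 = 0 then (st.1 ++ [(i + 1, t.1, t.2.1)], st.2)
          else (st.1, st.2.modify t.2.2 [] (fun l => l ++ [(i + 1, t.1, t.2.1)]))) st).1, 0 ≤ mi.2.1)
      ∧ (∀ q, ∀ a ∈ ((l.foldl (fun (st : List (Int × Int × Int) × PySem.Dict Int (List (Int × Int × Int))) i =>
          let t := (PySem.List.pyGet? items i).getD (0, 0, 0)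
          if t.2.2 = 0 then (st.1 ++ [(i + 1, t.1, t.2.1)], st.2)
          else (st.1, st.2.modify t.2.2 [] (fun l => l ++ [(i + 1, t.1, t.2.1)]))) st).2).getD q [], 0 ≤ a.2.1) := by
    intro l
    induction l with
    | nil => intro st _ h1 h2; exact ⟨h1, h2⟩
    | cons i l ih =>
      intro st hl h1 h2
      obtain ⟨hi0, him⟩ := hl i (by simp)
      have hidx : i.toNat < items.length := by omega
      have htget : (PySem.List.pyGet? items i).getD (0, 0, 0) = items[i.toNat] := by
        rw [PySem.List.pyGet?_of_nonneg items hi0]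
        simp [List.getElem?_eq_getElem hidx]
      have ht1 : 0 ≤ ((PySem.List.pyGet? items i).getD (0, 0, 0)).1 := by
        rw [htget]
        apply hpre
        rw [List.mem_take_iff_getElem]
        exact ⟨i.toNat, by omega, rfl⟩
      simp only [List.foldl_cons]
      apply ih _ (fun j hj => hl j (by simp [hj]))
      · -- mains component
        split
        · intro mi hm
          rcases List.mem_append.mp hm with h | h
          · exact h1 mi h
          · simp only [List.mem_singleton] at h
            rw [h]
            exact ht1
        · exact h1
      · -- attach component
        split
        · exact h2
        · intro q a ha
          simp only at ha
          rw [PySem.Dict.getD_modify] at ha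
          by_cases hq : q = ((PySem.List.pyGet? items i).getD (0, 0, 0)).2.2
          · rw [if_pos hq] at ha
            rcases List.mem_append.mp ha with h | h
            · exact h2 _ a h
            · simp only [List.mem_singleton] at h
              rw [h]
              exact ht1
          · rw [if_neg hq] at ha
            exact h2 _ a ha
  apply key
  · intro i hi
    have := PySem.List.mem_pyRange_one.mp hi
    omega
  · intro mi hm
    simp at hm
  · intro q a ha
    rw [PySem.Dict.getD_empty] at ha
    simp at ha

-- the left-to-right sweeps over the mains build bestF of the reversed group list
lemma mains_fold (N : Int) (attach : PySem.Dict Int (List (Int × Int × Int)))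
    (hN : 0 ≤ N) (hattach : ∀ q, ∀ a ∈ attach.getD q [], 0 ≤ a.2.1) :
    ∀ (ms : List (Int × Int × Int)) (gs : List (List (Int × Int))) (dp : List Int),
      (∀ mi ∈ ms, 0 ≤ mi.2.1) → gsOk gs →
      dp.length = (N + 1).toNat →
      (∀ j, 0 ≤ j → j ≤ N → PySem.List.pyGetD dp j 0 = bestF gs j) →
      (ms.foldl (fun dp mi =>
          (PySem.List.pyRange N (mi.2.1 - 1) (-1)).foldl (aBody (attach.get? mi.1) mi.2.1 mi.2.2) dp) dp).length
        = (N + 1).toNat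
      ∧ ∀ j, 0 ≤ j → j ≤ N →
          PySem.List.pyGetD (ms.foldl (fun dp mi =>
              (PySem.List.pyRange N (mi.2.1 - 1) (-1)).foldl (aBody (attach.get? mi.1) mi.2.1 mi.2.2) dp) dp) j 0
            = bestF ((ms.map (fun mi => bOptions mi.2.1 mi.2.2 (attach.getD mi.1 []))).reverse ++ gs) j := by
  intro ms
  induction ms with
  | nil =>
    intro gs dp _ _ hlen hdp
    exact ⟨hlen, by simpa using hdp⟩
  | cons mi ms ih =>
    intro gs dp hms hgs hlen hdp
    have hv : 0 ≤ mi.2.1 := hms mi (by simp)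
    have hattD : ∀ a ∈ (attach.get? mi.1).getD [], 0 ≤ a.2.1 := by
      intro a ha
      apply hattach mi.1
      rwa [PySem.Dict.getD_eq_get?_getD]
    obtain ⟨hS1, hS2⟩ := sweep_spec N mi.2.1 mi.2.2 (attach.get? mi.1) gs dp hlen hN hv hattD hgs hdp
    have hg : grpOk (bOptions mi.2.1 mi.2.2 ((attach.get? mi.1).getD [])) :=
      bOptions_grpOk _ _ _ hv hattD
    have hgs' : gsOk (bOptions mi.2.1 mi.2.2 ((attach.get? mi.1).getD []) :: gs) := by
      intro x hx
      rcases List.mem_cons.mp hx with h | h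
      · rwa [h]
      · exact hgs x h
    obtain ⟨hI1, hI2⟩ := ih (bOptions mi.2.1 mi.2.2 ((attach.get? mi.1).getD []) :: gs)
      ((PySem.List.pyRange N (mi.2.1 - 1) (-1)).foldl (aBody (attach.get? mi.1) mi.2.1 mi.2.2) dp)
      (fun mi' h => hms mi' (List.mem_cons_of_mem _ h)) hgs' (by rw [hS1, hlen]) hS2
    have hgetD : attach.getD mi.1 [] = (attach.get? mi.1).getD [] :=
      PySem.Dict.getD_eq_get?_getD attach mi.1 []
    refine ⟨by simpa using hI1, ?_⟩
    intro j hj0 hjN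
    simp only [List.foldl_cons]
    rw [hI2 j hj0 hjN, List.map_cons, List.reverse_cons, List.append_assoc, hgetD]
    rfl

-- ===== VERDICT (by name: the statement is the Claim_ definition above) =====
set_option maxHeartbeats 400000 in
theorem maximize_satisfaction_spec : Claim_equal_maximize_satisfaction := by
  intro N m items _ hpre
  obtain ⟨hN, hm, hpos⟩ := hpre
  obtain ⟨hmains, hattach⟩ := build_inv items m hm hpos
  unfold Spec_maximize_satisfaction
  simp only [maximize_satisfaction, maximize_satisfaction_alt]
  set st := (PySem.List.pyRange 0 m 1).foldl
    (fun (st : List (Int × Int × Int) × PySem.Dict Int (List (Int × Int × Int))) i =>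
      let t := (PySem.List.pyGet? items i).getD (0, 0, 0)
      if t.2.2 = 0 then (st.1 ++ [(i + 1, t.1, t.2.1)], st.2)
      else (st.1, st.2.modify t.2.2 [] (fun l => l ++ [(i + 1, t.1, t.2.1)])))
    ([], PySem.Dict.empty) with hst
  have hdp0len : (List.replicate (N + 1).toNat (0 : Int)).length = (N + 1).toNat :=
    List.length_replicate
  have hdp0 : ∀ j, 0 ≤ j → j ≤ N →
      PySem.List.pyGetD (List.replicate (N + 1).toNat (0 : Int)) j 0 = bestF [] j := by
    intro j hj0 hjN
    rw [PySem.List.pyGetD_eq_getElem _ _ hj0 (by rw [hdp0len]; omega)]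
    rw [List.getElem_replicate]
    rfl
  obtain ⟨hA1, hA2⟩ := mains_fold N st.2 hN (fun q a ha => hattach q a ha) st.1 []
    (List.replicate (N + 1).toNat 0) hmains (by intro g hg; simp at hg) hdp0len hdp0
  rw [hA2 N hN le_rfl, List.append_nil]
  have hgsok : gsOk (st.1.map (fun mi => bOptions mi.2.1 mi.2.2 (st.2.getD mi.1 []))) := by
    intro g hg
    rw [List.mem_map] at hg
    obtain ⟨mi, hmi, rfl⟩ := hg
    exact bOptions_grpOk _ _ _ (hmains mi hmi) (fun a ha => hattach mi.1 a ha)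
  rw [bestF_reverse _ N hgsok hN]
  rw [PySem.List.foldl_append_singleton_eq_map, List.nil_append]
  have hmemo : memoOk (st.1.map (fun mi => bOptions mi.2.1 mi.2.2 (st.2.getD mi.1 []))) PySem.Dict.empty := by
    intro i b v h
    rw [PySem.Dict.get?_empty] at h
    exact absurd h (by simp)
  have hrest : (st.1.map (fun mi => bOptions mi.2.1 mi.2.2 (st.2.getD mi.1 [])))
      = (st.1.map (fun mi => bOptions mi.2.1 mi.2.2 (st.2.getD mi.1 []))).drop ((0 : Int)).toNat := by
    rw [Int.toNat_zero, List.drop_zero]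
  have hB := (bSolve_spec _ hgsok _ 0 N _ hrest le_rfl hN hmemo).1
  rw [hB]
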